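-- pv_equiv track=rewrite | github.com/mohy14k/dsp | task2.py | DerivativeSignal
-- ===== SOURCE A (Python) =====
-- def DerivativeSignal(values:list,type_drev:str):
--     drev_results = []
--     if type_drev == 'first':
--         for n in range(1,len(values)):
--             drev_results.append(values[n] - values[n-1])
--     else:
--         for n in range(1,len(values)-1):
--             drev_results.append(values[n+1] - 2*values[n]+ values[n-1])
--
--     return drev_results
-- ===== SOURCE B (Python) =====
-- def DerivativeSignal(values: list, type_drev: str):
--     def diff(seq):
--         return [b - a for a, b in zip(seq, seq[1:])]
--     d = diff(values)
--     return d if type_drev == 'first' else diff(d)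
-- ===== Notes on version B (the rewrite author's own statement) =====
-- stated objective: simpler
-- what changed: B replaces the two index-based stencil loops by one zip-based diff helper, computing the second derivative as diff applied twice instead of a three-term stencil.
import Mathlib
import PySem

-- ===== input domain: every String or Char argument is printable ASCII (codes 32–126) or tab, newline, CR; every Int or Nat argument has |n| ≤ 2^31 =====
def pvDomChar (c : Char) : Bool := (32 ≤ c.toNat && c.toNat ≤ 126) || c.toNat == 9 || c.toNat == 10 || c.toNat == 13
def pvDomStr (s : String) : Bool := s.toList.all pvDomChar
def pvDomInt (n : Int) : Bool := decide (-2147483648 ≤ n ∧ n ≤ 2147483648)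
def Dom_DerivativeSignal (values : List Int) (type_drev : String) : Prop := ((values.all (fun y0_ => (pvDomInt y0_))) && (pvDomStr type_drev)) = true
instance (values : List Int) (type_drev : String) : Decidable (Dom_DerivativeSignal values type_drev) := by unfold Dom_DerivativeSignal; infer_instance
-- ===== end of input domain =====

-- B restructures the two index-stencil loops as one zip-based diff helper, with the
-- second derivative computed as diff applied twice (objective: simpler).

-- ===== PORT A =====
def DerivativeSignal (values : List Int) (type_drev : String) : List Int :=
  let drev_results : List Int := []
  if type_drev == "first" then
    (PySem.List.pyRange 1 (values.length : Int)).foldl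
      (fun acc n => acc ++ [PySem.List.pyGetD values n 0 - PySem.List.pyGetD values (n - 1) 0])
      drev_results
  else
    (PySem.List.pyRange 1 ((values.length : Int) - 1)).foldl
      (fun acc n => acc ++ [PySem.List.pyGetD values (n + 1) 0 - 2 * PySem.List.pyGetD values n 0
                              + PySem.List.pyGetD values (n - 1) 0])
      drev_results

-- ===== PORT B =====
-- [b - a for a, b in zip(seq, seq[1:])]
def pvDiff (seq : List Int) : List Int :=
  (seq.zip (PySem.List.slice seq (some 1) none)).map (fun p => p.2 - p.1)

def DerivativeSignal_alt (values : List Int) (type_drev : String) : List Int :=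
  let d := pvDiff values
  if type_drev == "first" then d else pvDiff d

-- ===== PRECONDITION & SPEC =====
def Spec_DerivativeSignal (values : List Int) (type_drev : String) (out : List Int) : Prop := out = DerivativeSignal_alt values type_drev
instance (values : List Int) (type_drev : String) (out : List Int) : Decidable (Spec_DerivativeSignal values type_drev out) := by unfold Spec_DerivativeSignal; infer_instance

-- ===== CLAIM (what is proved, stated in full; the proofs are below) =====
def Claim_equal_DerivativeSignal : Prop := ∀ (values : List Int) (type_drev : String), Dom_DerivativeSignal values type_drev → Spec_DerivativeSignal values type_drev (DerivativeSignal values type_drev)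

-- ===== LEMMAS AND PROOFS =====
theorem length_pvDiff (v : List Int) : (pvDiff v).length = v.length - 1 := by
  simp [pvDiff, PySem.List.slice_from_one]

theorem getElem_pvDiff (v : List Int) (i : Nat) (h2 : i < (pvDiff v).length)
    (h : i + 1 < v.length) :
    (pvDiff v)[i] = v[i + 1] - v[i] := by
  simp [pvDiff, PySem.List.slice_from_one, List.getElem_zip, List.getElem_tail]

theorem pyGetD_nat (v : List Int) (k : Nat) (h : k < v.length) :
    PySem.List.pyGetD v (k : Int) 0 = v[k] := by
  rw [PySem.List.pyGetD_natCast]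
  exact List.getD_eq_getElem v 0 h

theorem first_eq (v : List Int) :
    (PySem.List.pyRange 1 (v.length : Int)).foldl
      (fun acc n => acc ++ [PySem.List.pyGetD v n 0 - PySem.List.pyGetD v (n - 1) 0]) []
    = pvDiff v := by
  rw [PySem.List.foldl_append_singleton_eq_map, List.nil_append]
  apply List.ext_getElem
  · simp [PySem.List.length_pyRange_one, length_pvDiff]
  · intro i h1 h2
    have hlen : i + 1 < v.length := by
      have := h2; rw [length_pvDiff] at this; omega
    simp only [List.getElem_map, PySem.List.getElem_pyRange_one]
    have e1 : (1 : Int) + (i : Int) = ((i + 1 : Nat) : Int) := by push_cast; ring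
    have e2 : ((i + 1 : Nat) : Int) - 1 = ((i : Nat) : Int) := by push_cast; ring
    rw [e1, e2, pyGetD_nat v (i + 1) hlen, pyGetD_nat v i (by omega),
        getElem_pvDiff v i h2 hlen]

theorem second_eq (v : List Int) :
    (PySem.List.pyRange 1 ((v.length : Int) - 1)).foldl
      (fun acc n => acc ++ [PySem.List.pyGetD v (n + 1) 0 - 2 * PySem.List.pyGetD v n 0
                              + PySem.List.pyGetD v (n - 1) 0]) []
    = pvDiff (pvDiff v) := by
  rw [PySem.List.foldl_append_singleton_eq_map, List.nil_append]
  apply List.ext_getElem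
  · simp [PySem.List.length_pyRange_one, length_pvDiff]
  · intro i h1 h2
    have hd2 : i + 1 < (pvDiff v).length := by
      rw [length_pvDiff]
      have := h2; rw [length_pvDiff, length_pvDiff] at this; omega
    have hlen : i + 2 < v.length := by
      have := hd2; rw [length_pvDiff] at this; omega
    simp only [List.getElem_map, PySem.List.getElem_pyRange_one]
    have e1 : (1 : Int) + (i : Int) + 1 = ((i + 2 : Nat) : Int) := by push_cast; ring
    have e2 : (1 : Int) + (i : Int) = ((i + 1 : Nat) : Int) := by push_cast; ring
    have e3 : ((i + 1 : Nat) : Int) - 1 = ((i : Nat) : Int) := by push_cast; ring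
    rw [e1, e2, e3, pyGetD_nat v (i + 2) hlen, pyGetD_nat v (i + 1) (by omega),
        pyGetD_nat v i (by omega),
        getElem_pvDiff (pvDiff v) i h2 hd2,
        getElem_pvDiff v (i + 1) hd2 (by omega),
        getElem_pvDiff v i (by omega) (by omega)]
    have e4 : i + 1 + 1 = i + 2 := rfl
    simp only [e4]
    ring

-- ===== VERDICT (by name: the statement is the Claim_ definition above) =====
theorem DerivativeSignal_spec : Claim_equal_DerivativeSignal := by
  intro values type_drev _
  unfold Spec_DerivativeSignal DerivativeSignal DerivativeSignal_alt
  cases ht : (type_drev == "first") <;>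
    simp only [Bool.false_eq_true, if_true, if_false]
  · exact second_eq values
  · exact first_eq values
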